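-- pv_equiv track=rewrite | github.com/DavideFauri/euler | Python 3/Problem_011.py | search_ver
-- ===== SOURCE A (Python) =====
-- def grid_size(grid):
--     width = len(grid[0])
--     height = len(grid)
--     return (width, height)
--
-- def search_ver(grid, len_pattern):
--     grid_width, grid_height = grid_size(grid)
--     max_ver = 0
--
--     for col_ix in range(grid_width):
--         for row_ix in range(grid_height - len_pattern):
--
--             productory = 1
--             for shift in range(len_pattern):
--                 productory *= grid[row_ix + shift][col_ix]
--
--             max_ver = max(max_ver, productory)
--     return max_ver
-- ===== SOURCE B (Python) =====
-- def search_ver(grid, len_pattern):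
--     height = len(grid)
--     width = len(grid[0])
--     nwin = height - len_pattern
--     if nwin <= 0 or width == 0:
--         return 0
--     if len_pattern <= 0:
--         return 1
--     best = 0
--     for c in range(width):
--         # product of the nonzero entries of the current window, and its zero count
--         prod = 1
--         zeros = 0
--         for r in range(len_pattern):
--             v = grid[r][c]
--             if v == 0:
--                 zeros += 1
--             else:
--                 prod *= v
--         for i in range(nwin):
--             best = max(best, prod if zeros == 0 else 0)
--             if i + 1 < nwin:
--                 out_v = grid[i][c]
--                 in_v = grid[i + len_pattern][c]
--                 if out_v == 0:
--                     zeros -= 1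
--                 else:
--                     prod //= out_v
--                 if in_v == 0:
--                     zeros += 1
--                 else:
--                     prod *= in_v
--     return best
-- ===== Notes on version B (the rewrite author's own statement) =====
-- stated objective: alternative
-- what changed: Per column, B replaces A's recomputation of each window product from scratch with a sliding window that maintains the product of the window's nonzero entries plus a zero count (exact integer division removes the outgoing entry), and B returns early on the degenerate cases (no windows, empty rows, non-positive pattern length); it does len_pattern times less multiplication work per window, which only pays off for large pattern lengths.
import Mathlib
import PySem

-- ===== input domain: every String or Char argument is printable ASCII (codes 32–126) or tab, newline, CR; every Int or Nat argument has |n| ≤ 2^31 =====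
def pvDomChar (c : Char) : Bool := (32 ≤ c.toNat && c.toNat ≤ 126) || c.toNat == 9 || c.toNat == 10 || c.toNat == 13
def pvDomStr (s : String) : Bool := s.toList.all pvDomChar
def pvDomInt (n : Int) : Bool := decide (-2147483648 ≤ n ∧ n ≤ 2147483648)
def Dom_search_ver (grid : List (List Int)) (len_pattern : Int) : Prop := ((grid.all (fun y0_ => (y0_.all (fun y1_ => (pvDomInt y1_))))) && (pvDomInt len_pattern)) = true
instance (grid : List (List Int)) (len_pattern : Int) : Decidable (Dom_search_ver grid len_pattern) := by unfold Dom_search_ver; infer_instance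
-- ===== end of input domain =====

-- B replaces A's per-window product recomputation by a per-column sliding window
-- (nonzero-product + zero count, exact division on the outgoing entry), with early
-- returns for the degenerate cases. Equality of the two ports is proved on Pre_
-- (exactly where Python A returns).

-- grid[r][c] with a default (both Pythons index the same way; in range under Pre_)
def pvCell (grid : List (List Int)) (c r : Int) : Int :=
  PySem.List.pyGetD (PySem.List.pyGetD grid r []) c 0

-- ===== PORT A =====
def grid_size (grid : List (List Int)) : Int × Int :=
  (((grid.headD []).length : Int), ((grid.length : Int)))

def search_ver (grid : List (List Int)) (len_pattern : Int) : Int :=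
  let wh := grid_size grid
  let grid_width := wh.1
  let grid_height := wh.2
  (PySem.List.pyRange 0 grid_width 1).foldl (fun max_ver col_ix =>
    (PySem.List.pyRange 0 (grid_height - len_pattern) 1).foldl (fun mv row_ix =>
      let productory := (PySem.List.pyRange 0 len_pattern 1).foldl
        (fun p shift => p * pvCell grid col_ix (row_ix + shift)) 1
      max mv productory) max_ver) 0

-- ===== PORT B =====
-- the first inner loop of Source B: accumulate (product of nonzero entries, zero count)
def pvInitStep (grid : List (List Int)) (c : Int) (pz : Int × Int) (r : Int) : Int × Int :=
  let v := pvCell grid c r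
  if v = 0 then (pz.1, pz.2 + 1) else (pz.1 * v, pz.2)

-- the second inner loop of Source B: take the window's value, then slide the window by one
def pvSlideStep (grid : List (List Int)) (c len_pattern nwin : Int)
    (s : Int × Int × Int) (i : Int) : Int × Int × Int :=
  let best := max s.1 (if s.2.2 = 0 then s.2.1 else 0)
  if i + 1 < nwin then
    let out_v := pvCell grid c i
    let in_v := pvCell grid c (i + len_pattern)
    let pz1 : Int × Int := if out_v = 0 then (s.2.1, s.2.2 - 1)
                           else (PySem.Int.floordiv s.2.1 out_v, s.2.2)
    let pz2 : Int × Int := if in_v = 0 then (pz1.1, pz1.2 + 1) else (pz1.1 * in_v, pz1.2)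
    (best, pz2)
  else (best, s.2)

def search_ver_alt (grid : List (List Int)) (len_pattern : Int) : Int :=
  let height : Int := grid.length
  let width : Int := (grid.headD []).length
  let nwin : Int := height - len_pattern
  if nwin ≤ 0 ∨ width = 0 then 0
  else if len_pattern ≤ 0 then 1
  else
    (PySem.List.pyRange 0 width 1).foldl (fun best c =>
      let pz := (PySem.List.pyRange 0 len_pattern 1).foldl (pvInitStep grid c) (1, 0)
      ((PySem.List.pyRange 0 nwin 1).foldl (pvSlideStep grid c len_pattern nwin) (best, pz)).1) 0

-- ===== PRECONDITION & SPEC =====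
-- Pre_ = exactly where Python A returns: a nonempty grid, and whenever any cell is
-- actually read (0 < len_pattern < height) every row that is read (all but the last)
-- is at least as long as the first row (A raises IndexError otherwise).
def Pre_search_ver (grid : List (List Int)) (len_pattern : Int) : Prop :=
  grid ≠ [] ∧ ((0 < len_pattern ∧ len_pattern < (grid.length : Int)) →
    ∀ row ∈ grid.dropLast, (grid.headD []).length ≤ row.length)
instance (grid : List (List Int)) (len_pattern : Int) : Decidable (Pre_search_ver grid len_pattern) := by
  unfold Pre_search_ver; infer_instance

def pvWitness_search_ver : List (List Int) × Int := ([[1, 2], [3, 4], [5, 6]], 2)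

def Spec_search_ver (grid : List (List Int)) (len_pattern : Int) (out : Int) : Prop := out = search_ver_alt grid len_pattern
instance (grid : List (List Int)) (len_pattern : Int) (out : Int) : Decidable (Spec_search_ver grid len_pattern out) := by unfold Spec_search_ver; infer_instance

-- ===== CLAIM (what is proved, stated in full; the proofs are below) =====
def Claim_equal_search_ver : Prop := ∀ (grid : List (List Int)) (len_pattern : Int), Dom_search_ver grid len_pattern → Pre_search_ver grid len_pattern → Spec_search_ver grid len_pattern (search_ver grid len_pattern)

-- ===== LEMMAS AND PROOFS =====

-- the window of L values of column c starting at row i (generic in the cell accessor g)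
def pvWin (g : Int → Int) (L i : Nat) : List Int :=
  (List.range L).map (fun (s : Nat) => g ((i : Int) + (s : Int)))

-- product of the nonzero entries, and number of zeros, of a list
def pvNz (l : List Int) : Int := (l.filter (fun v => decide (v ≠ 0))).prod
def pvZ (l : List Int) : Nat := l.count 0

lemma pvNz_cons (v : Int) (l : List Int) :
    pvNz (v :: l) = (if v = 0 then 1 else v) * pvNz l := by
  by_cases hv : v = 0 <;> simp [pvNz, hv]

lemma pvZ_cons (v : Int) (l : List Int) :
    pvZ (v :: l) = (if v = 0 then 1 else 0) + pvZ l := by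
  by_cases hv : v = 0 <;> simp [pvZ, hv, List.count_cons] <;> omega

lemma pvNz_snoc (l : List Int) (v : Int) :
    pvNz (l ++ [v]) = pvNz l * (if v = 0 then 1 else v) := by
  by_cases hv : v = 0 <;> simp [pvNz, hv]

lemma pvZ_snoc (l : List Int) (v : Int) :
    pvZ (l ++ [v]) = pvZ l + (if v = 0 then 1 else 0) := by
  by_cases hv : v = 0 <;> simp [pvZ, hv, List.count_append]

lemma pvProd_char (l : List Int) :
    l.prod = if pvZ l = 0 then pvNz l else 0 := by
  induction l with
  | nil => simp [pvNz, pvZ]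
  | cons v t ih =>
    by_cases hv : v = 0
    · simp [hv, pvZ, List.count_cons]
    · rw [List.prod_cons, ih, pvNz_cons, pvZ_cons]
      simp [hv, mul_ite]

lemma pvWin_cons (g : Int → Int) (M i : Nat) :
    pvWin g (M + 1) i = g i :: pvWin g M (i + 1) := by
  simp only [pvWin, List.range_succ_eq_map, List.map_cons, List.map_map]
  congr 1
  apply List.map_congr_left
  intro a _
  simp only [Function.comp_apply]
  congr 1
  push_cast
  ring

lemma pvWin_snoc (g : Int → Int) (M i : Nat) :
    pvWin g (M + 1) (i + 1) = pvWin g M (i + 1) ++ [g ((i : Int) + ((M : Int) + 1))] := by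
  simp only [pvWin, List.range_succ, List.map_append, List.map_cons, List.map_nil]
  congr 2
  push_cast; ring

-- the first inner loop of B computes (nonzero product, zero count) of the mapped values
lemma pvInit_fold (vs : List Int) : ∀ (p z : Int),
    vs.foldl (fun pz v => if v = 0 then (pz.1, pz.2 + 1) else (pz.1 * v, pz.2)) (p, z)
      = (p * pvNz vs, z + (pvZ vs : Int)) := by
  induction vs with
  | nil => intro p z; simp [pvNz, pvZ]
  | cons v t ih =>
    intro p z
    by_cases hv : v = 0
    · simp only [List.foldl_cons, hv, if_pos rfl, ih, pvNz_cons, pvZ_cons]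
      simp; push_cast; omega
    · simp only [List.foldl_cons, if_neg hv, ih, pvNz_cons, pvZ_cons]
      simp [hv, mul_assoc]

-- mapping g over a range of row indices yields the window
lemma pvMap_pyRange_win (g : Int → Int) (a b : Int) (ha : 0 ≤ a) :
    (PySem.List.pyRange a b 1).map g = pvWin g (b - a).toNat a.toNat := by
  rw [PySem.List.pyRange_one]
  simp only [pvWin, List.map_map]
  apply List.map_congr_left
  intro s _
  simp [Function.comp, Int.toNat_of_nonneg ha]

-- A's innermost loop computes the window product
lemma pvProd_fold (g : Int → Int) (lp row : Int) (hrow : 0 ≤ row) :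
    (PySem.List.pyRange 0 lp 1).foldl (fun p s => p * g (row + s)) 1
      = (pvWin g lp.toNat row.toNat).prod := by
  have h := pvMap_pyRange_win (fun x => g (row + x)) 0 lp le_rfl
  have hfold : (PySem.List.pyRange 0 lp 1).foldl (fun p s => p * g (row + s)) 1
      = ((PySem.List.pyRange 0 lp 1).map (fun x => g (row + x))).foldl (· * ·) 1 := by
    rw [List.foldl_map]
  rw [hfold, h, ← List.prod_eq_foldl]
  simp only [Int.sub_zero, Int.toNat_zero, pvWin]
  apply congrArg
  apply List.map_congr_left
  intro s _
  congr 1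
  rw [Int.toNat_of_nonneg hrow]
  push_cast; ring

-- B's best-update takes the true window product
lemma pvBest_eq (b : Int) (w : List Int) :
    max b (if ((pvZ w : Int)) = 0 then pvNz w else 0) = max b w.prod := by
  rw [pvProd_char w]
  by_cases h : pvZ w = 0 <;> simp [h]

-- one slide of B's state, when the guard fires
lemma pvSlide_state (grid : List (List Int)) (c lp nwin : Int) (hlp : 0 < lp)
    (i : Nat) (b : Int) (hguard : (i : Int) + 1 < nwin) :
    pvSlideStep grid c lp nwin
      (b, pvNz (pvWin (pvCell grid c) lp.toNat i), (pvZ (pvWin (pvCell grid c) lp.toNat i) : Int)) i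
    = (max b (pvWin (pvCell grid c) lp.toNat i).prod,
       pvNz (pvWin (pvCell grid c) lp.toNat (i + 1)),
       (pvZ (pvWin (pvCell grid c) lp.toNat (i + 1)) : Int)) := by
  obtain ⟨M, hM⟩ : ∃ M, lp.toNat = M + 1 := ⟨lp.toNat - 1, by omega⟩
  have hcons := pvWin_cons (pvCell grid c) M i
  have hsnoc := pvWin_snoc (pvCell grid c) M i
  have hin' : (i : Int) + lp = (i : Int) + ((M : Int) + 1) := by omega
  unfold pvSlideStep
  rw [if_pos hguard]
  simp only [Prod.mk.injEq]
  refine ⟨pvBest_eq _ _, ?_⟩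
  rw [hM, hcons, hsnoc, hin']
  by_cases hout : pvCell grid c ((i : Nat) : Int) = 0
  · simp only [if_pos hout]
    by_cases hinv : pvCell grid c ((i : Int) + ((M : Int) + 1)) = 0
    · simp only [if_pos hinv]
      rw [pvNz_cons, pvZ_cons, pvNz_snoc, pvZ_snoc]
      simp only [if_pos hout, if_pos hinv, Prod.mk.injEq]
      constructor
      · ring
      · push_cast; ring
    · simp only [if_neg hinv]
      rw [pvNz_cons, pvZ_cons, pvNz_snoc, pvZ_snoc]
      simp only [if_pos hout, if_neg hinv, Prod.mk.injEq]
      constructor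
      · ring
      · push_cast; ring
  · simp only [if_neg hout]
    by_cases hinv : pvCell grid c ((i : Int) + ((M : Int) + 1)) = 0
    · simp only [if_pos hinv]
      rw [pvNz_cons, pvZ_cons, pvNz_snoc, pvZ_snoc]
      simp only [if_neg hout, if_pos hinv, Prod.mk.injEq, PySem.Int.floordiv]
      rw [Int.mul_fdiv_cancel_left _ hout]
      constructor
      · ring
      · push_cast; ring
    · simp only [if_neg hinv]
      rw [pvNz_cons, pvZ_cons, pvNz_snoc, pvZ_snoc]
      simp only [if_neg hout, if_neg hinv, Prod.mk.injEq, PySem.Int.floordiv]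
      rw [Int.mul_fdiv_cancel_left _ hout]
      constructor
      · ring
      · push_cast; ring

-- B's slide loop from a coherent state computes the running max of window products
lemma pvSlide_loop (grid : List (List Int)) (c lp nwin : Int) (hlp : 0 < lp) :
    ∀ (k : Nat) (i b : Int), 0 ≤ i → i + k = nwin →
    ((PySem.List.pyRange i nwin 1).foldl (pvSlideStep grid c lp nwin)
        (b, pvNz (pvWin (pvCell grid c) lp.toNat i.toNat),
            (pvZ (pvWin (pvCell grid c) lp.toNat i.toNat) : Int))).1
      = (PySem.List.pyRange i nwin 1).foldl
          (fun m j => max m (pvWin (pvCell grid c) lp.toNat j.toNat).prod) b := by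
  intro k
  induction k with
  | zero =>
    intro i b hi hk
    rw [PySem.List.pyRange_one_eq_nil (by omega)]
    simp
  | succ k ih =>
    intro i b hi hk
    rw [PySem.List.pyRange_one_cons (by omega)]
    simp only [List.foldl_cons]
    rcases Nat.eq_zero_or_pos k with hk0 | hkpos
    · -- last window: guard is false, remaining range empty
      subst hk0
      rw [PySem.List.pyRange_one_eq_nil (by omega)]
      simp only [List.foldl_nil]
      unfold pvSlideStep
      rw [if_neg (by omega)]
      simp only
      rw [pvBest_eq]
    · -- guard fires: slide the state and recurse
      have hstep := pvSlide_state grid c lp nwin hlp i.toNat b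
        (by rw [Int.toNat_of_nonneg hi]; omega)
      rw [Int.toNat_of_nonneg hi] at hstep
      rw [hstep]
      have htn : (i + 1).toNat = i.toNat + 1 := by omega
      have := ih (i + 1) (max b (pvWin (pvCell grid c) lp.toNat i.toNat).prod) (by omega) (by omega)
      rw [htn] at this
      exact this

-- B's whole column loop, in canonical form
lemma pvColB_eq (grid : List (List Int)) (c lp nwin : Int) (hlp : 0 < lp) (hn : 0 < nwin) (b : Int) :
    ((PySem.List.pyRange 0 nwin 1).foldl (pvSlideStep grid c lp nwin)
        (b, (PySem.List.pyRange 0 lp 1).foldl (pvInitStep grid c) (1, 0))).1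
      = (PySem.List.pyRange 0 nwin 1).foldl
          (fun m j => max m (pvWin (pvCell grid c) lp.toNat j.toNat).prod) b := by
  have hmap := pvMap_pyRange_win (pvCell grid c) 0 lp le_rfl
  have hinit : (PySem.List.pyRange 0 lp 1).foldl (pvInitStep grid c) (1, 0)
      = (pvNz (pvWin (pvCell grid c) lp.toNat 0), (pvZ (pvWin (pvCell grid c) lp.toNat 0) : Int)) := by
    have : (PySem.List.pyRange 0 lp 1).foldl (pvInitStep grid c) (1, 0)
        = ((PySem.List.pyRange 0 lp 1).map (pvCell grid c)).foldl
            (fun pz v => if v = 0 then (pz.1, pz.2 + 1) else (pz.1 * v, pz.2)) (1, 0) := by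
      rw [List.foldl_map]; rfl
    rw [this, hmap, pvInit_fold]
    simp
  rw [hinit]
  have := pvSlide_loop grid c lp nwin hlp nwin.toNat 0 b le_rfl (by omega)
  simpa using this

-- A's whole column loop, in the same canonical form
lemma pvColA_eq (grid : List (List Int)) (c lp nwin : Int) (b : Int) :
    (PySem.List.pyRange 0 nwin 1).foldl (fun mv row =>
        max mv ((PySem.List.pyRange 0 lp 1).foldl
          (fun p shift => p * pvCell grid c (row + shift)) 1)) b
      = (PySem.List.pyRange 0 nwin 1).foldl
          (fun m j => max m (pvWin (pvCell grid c) lp.toNat j.toNat).prod) b := by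
  apply PySem.List.foldl_congr_mem
  intro acc row hrow
  have h0 : 0 ≤ row := by
    have := (PySem.List.mem_pyRange_one.mp hrow).1
    omega
  rw [pvProd_fold (pvCell grid c) lp row h0]

-- the 'len_pattern <= 0' case: a running max with 1, over a nonempty list, is max b 1
lemma pvFold_max_one (l : List α) : ∀ b : Int,
    l.foldl (fun m (_ : α) => max m 1) (max b 1) = max b 1 := by
  induction l with
  | nil => intro b; rfl
  | cons a t ih =>
    intro b
    simp only [List.foldl_cons]
    rw [show max (max b 1) 1 = max b 1 by omega]
    exact ih b

lemma pvFold_max_one_nonempty (l : List α) (hl : l ≠ []) (b : Int) :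
    l.foldl (fun m (_ : α) => max m 1) b = max b 1 := by
  cases l with
  | nil => exact absurd rfl hl
  | cons a t => simp only [List.foldl_cons]; exact pvFold_max_one t b

-- ===== VERDICT (by name: the statement is the Claim_ definition above) =====
theorem search_ver_spec : Claim_equal_search_ver := by
  intro grid lp _ _
  unfold Spec_search_ver search_ver search_ver_alt grid_size
  simp only
  set H : Int := (grid.length : Int) with hH
  set W : Int := ((grid.headD []).length : Int) with hW
  by_cases h1 : H - lp ≤ 0 ∨ W = 0
  · rw [if_pos h1]
    rcases h1 with h1 | h1
    · have hnil : PySem.List.pyRange 0 (H - lp) 1 = [] := PySem.List.pyRange_one_eq_nil (by omega)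
      simp only [hnil, List.foldl_nil]
      exact PySem.List.foldl_ignore _ _
    · rw [h1, PySem.List.pyRange_one_eq_nil (le_refl (0 : Int))]
      simp
  · rw [if_neg h1]
    push_neg at h1
    obtain ⟨hn, hw⟩ := h1
    have hW0 : 0 < W := by
      have : 0 ≤ W := by rw [hW]; positivity
      omega
    by_cases h2 : lp ≤ 0
    · rw [if_pos h2]
      have hinner : ∀ (mv c : Int),
          (PySem.List.pyRange 0 (H - lp) 1).foldl (fun mv row =>
            max mv ((PySem.List.pyRange 0 lp 1).foldl
              (fun p shift => p * pvCell grid c (row + shift)) 1)) mv = max mv 1 := by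
        intro mv c
        have hnil : PySem.List.pyRange 0 lp 1 = [] := PySem.List.pyRange_one_eq_nil (by omega)
        simp only [hnil, List.foldl_nil]
        apply pvFold_max_one_nonempty
        rw [PySem.List.pyRange_one_cons (by omega)]
        exact List.cons_ne_nil _ _
      rw [PySem.List.foldl_congr_mem _ _ (fun mv (_ : Int) => max mv 1) _
        (fun acc c _ => hinner acc c)]
      rw [pvFold_max_one_nonempty]
      · omega
      · rw [PySem.List.pyRange_one_cons (by omega)]
        exact List.cons_ne_nil _ _
    · rw [if_neg h2]
      apply PySem.List.foldl_congr_mem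
      intro acc c _
      rw [pvColA_eq grid c lp (H - lp) acc,
          pvColB_eq grid c lp (H - lp) (by omega) (by omega) acc]
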